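-- pv_equiv track=rewrite | github.com/leoopd/learning-python | challenges/2651.py | findDelayedArrivalTime
-- ===== SOURCE A (Python) =====
-- def findDelayedArrivalTime(arrivalTime: int, delayedTime: int) -> int:
--     if arrivalTime + delayedTime <= 23:
--         return arrivalTime + delayedTime
--     else:
--         tmp = arrivalTime + delayedTime
--         while tmp >= 24:
--             tmp -= 24
--         return tmp
-- ===== SOURCE B (Python) =====
-- def findDelayedArrivalTime(arrivalTime: int, delayedTime: int) -> int:
--     s = arrivalTime + delayedTime
--     return s % 24 if s >= 24 else s
-- ===== Notes on version B (the rewrite author's own statement) =====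
-- stated objective: simpler
-- what changed: Replaces the repeated-subtraction while-loop with a single modulo, guarded so sums below 24 (including negatives) are returned unchanged exactly as A does.
import Mathlib
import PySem

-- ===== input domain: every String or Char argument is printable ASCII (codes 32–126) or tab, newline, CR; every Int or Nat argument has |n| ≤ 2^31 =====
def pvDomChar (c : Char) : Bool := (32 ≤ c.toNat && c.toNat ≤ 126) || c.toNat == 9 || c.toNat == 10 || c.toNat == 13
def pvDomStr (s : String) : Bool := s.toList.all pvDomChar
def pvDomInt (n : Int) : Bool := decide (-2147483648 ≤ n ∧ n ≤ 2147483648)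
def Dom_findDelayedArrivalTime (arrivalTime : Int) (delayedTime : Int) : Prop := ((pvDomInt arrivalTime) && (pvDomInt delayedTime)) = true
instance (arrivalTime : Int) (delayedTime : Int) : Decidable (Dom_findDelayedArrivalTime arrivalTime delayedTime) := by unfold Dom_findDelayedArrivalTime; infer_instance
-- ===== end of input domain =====

-- B replaces A's repeated-subtraction while-loop with a single guarded modulo (simpler).
-- ===== PORT A =====
-- the 'while tmp >= 24: tmp -= 24' loop of A
def findDelayedLoop (tmp : Int) : Int :=
  if tmp ≥ 24 then findDelayedLoop (tmp - 24) else tmp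
termination_by tmp.toNat
decreasing_by omega

def findDelayedArrivalTime (arrivalTime : Int) (delayedTime : Int) : Int :=
  if arrivalTime + delayedTime ≤ 23 then arrivalTime + delayedTime
  else findDelayedLoop (arrivalTime + delayedTime)

-- ===== PORT B =====
def findDelayedArrivalTime_alt (arrivalTime : Int) (delayedTime : Int) : Int :=
  let s := arrivalTime + delayedTime
  if s ≥ 24 then PySem.Int.mod s 24 else s

-- ===== PRECONDITION & SPEC =====
def Spec_findDelayedArrivalTime (arrivalTime : Int) (delayedTime : Int) (out : Int) : Prop := out = findDelayedArrivalTime_alt arrivalTime delayedTime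
instance (arrivalTime : Int) (delayedTime : Int) (out : Int) : Decidable (Spec_findDelayedArrivalTime arrivalTime delayedTime out) := by unfold Spec_findDelayedArrivalTime; infer_instance

-- ===== CLAIM (what is proved, stated in full; the proofs are below) =====
def Claim_equal_findDelayedArrivalTime : Prop := ∀ (arrivalTime : Int) (delayedTime : Int), Dom_findDelayedArrivalTime arrivalTime delayedTime → Spec_findDelayedArrivalTime arrivalTime delayedTime (findDelayedArrivalTime arrivalTime delayedTime)

-- ===== LEMMAS AND PROOFS =====

-- ===== VERDICT (by name: the statement is the Claim_ definition above) =====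
-- On nonnegative input the while-loop computes tmp % 24.
theorem findDelayedLoop_eq_mod (tmp : Int) (h : 0 ≤ tmp) :
    findDelayedLoop tmp = tmp % 24 := by
  rw [findDelayedLoop]
  split_ifs with h24
  · rw [findDelayedLoop_eq_mod (tmp - 24) (by omega)]; omega
  · omega
termination_by tmp.toNat
decreasing_by omega

theorem findDelayedArrivalTime_spec : Claim_equal_findDelayedArrivalTime := by
  intro a d _
  unfold Spec_findDelayedArrivalTime findDelayedArrivalTime findDelayedArrivalTime_alt
  show (if a + d ≤ 23 then a + d else findDelayedLoop (a + d)) =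
    (if a + d ≥ 24 then PySem.Int.mod (a + d) 24 else a + d)
  split_ifs with h1 h2
  · omega
  · rfl
  · rw [findDelayedLoop_eq_mod _ (by omega), PySem.Int.mod_eq_emod_of_pos (by omega)]
  · omega
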